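-- pv_equiv track=rewrite | github.com/zfaria/olist-weather-analytics | olist_weather_pipeline.py | categorize_group
-- ===== SOURCE A (Python) =====
-- def categorize_group(cat):
--     """Agrupa categorias em macro-grupos para análise no Power BI."""
--     if not isinstance(cat, str):
--         return "Outros"
--     cat = cat.lower()
--     if any(k in cat for k in ["electronics", "computer", "tablet", "telephony"]):
--         return "Eletrônicos"
--     elif any(k in cat for k in ["furniture", "home", "bed", "bath", "kitchen"]):
--         return "Casa e Decoração"
--     elif any(k in cat for k in ["fashion", "shoes", "watches", "sport"]):
--         return "Moda e Esporte"
--     elif any(k in cat for k in ["health", "beauty", "perfumery", "baby"]):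
--         return "Saúde e Beleza"
--     elif any(k in cat for k in ["food", "drinks", "market"]):
--         return "Alimentos"
--     elif any(k in cat for k in ["auto", "construction", "tools"]):
--         return "Auto e Ferramentas"
--     elif any(k in cat for k in ["books", "music", "dvds", "art"]):
--         return "Livros e Cultura"
--     else:
--         return "Outros"
-- ===== SOURCE B (Python) =====
-- # Inverted matching: instead of searching each keyword inside cat, scan every
-- # substring of plausible keyword length (3..12) of the lowered string and look
-- # it up in a keyword -> group-priority hash; the smallest priority seen wins.
--
-- KW = {
--     "electronics": 0, "computer": 0, "tablet": 0, "telephony": 0,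
--     "furniture": 1, "home": 1, "bed": 1, "bath": 1, "kitchen": 1,
--     "fashion": 2, "shoes": 2, "watches": 2, "sport": 2,
--     "health": 3, "beauty": 3, "perfumery": 3, "baby": 3,
--     "food": 4, "drinks": 4, "market": 4,
--     "auto": 5, "construction": 5, "tools": 5,
--     "books": 6, "music": 6, "dvds": 6, "art": 6,
-- }
--
-- LABELS = ["Eletrônicos", "Casa e Decoração", "Moda e Esporte", "Saúde e Beleza",
--           "Alimentos", "Auto e Ferramentas", "Livros e Cultura", "Outros"]
--
-- def categorize_group(cat):
--     """Agrupa categorias em macro-grupos para análise no Power BI."""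
--     if not isinstance(cat, str):
--         return "Outros"
--     c = cat.lower()
--     n = len(c)
--     best = 7
--     for i in range(n):
--         for j in range(i + 3, min(i + 12, n) + 1):
--             p = KW.get(c[i:j])
--             if p is not None and p < best:
--                 best = p
--     return LABELS[best]
-- ===== Notes on version B (the rewrite author's own statement) =====
-- stated objective: alternative
-- what changed: Inverts the matching direction: instead of searching each of the 27 keywords inside the string group by group, B enumerates every substring of keyword length (3-12) of the lowered string once, looks each up in a keyword-to-group-priority hash, and returns the label of the minimal priority found (7 = Outros).
import Mathlib
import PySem

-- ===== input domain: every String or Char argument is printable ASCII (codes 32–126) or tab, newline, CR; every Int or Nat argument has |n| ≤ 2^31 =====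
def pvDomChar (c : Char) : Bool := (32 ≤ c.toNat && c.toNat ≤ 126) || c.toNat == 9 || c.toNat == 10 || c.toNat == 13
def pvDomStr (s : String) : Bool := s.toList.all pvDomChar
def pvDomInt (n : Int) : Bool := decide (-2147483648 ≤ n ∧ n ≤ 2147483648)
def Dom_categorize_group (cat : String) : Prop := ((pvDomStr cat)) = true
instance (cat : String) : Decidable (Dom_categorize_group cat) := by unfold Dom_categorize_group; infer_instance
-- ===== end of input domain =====

-- B inverts the matching direction: it scans every substring of keyword length (3..12) of the
-- lowered string against a keyword→group-priority hash and returns the label of minimal priority,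
-- instead of searching each of the 27 keywords in the string group by group. Same result.

-- ===== PORT A =====
-- cat is a String here, so Python's isinstance guard is always true
def categorize_group (cat : String) : String :=
  let c := PySem.Str.lower cat
  if ["electronics", "computer", "tablet", "telephony"].any (fun k => PySem.Str.isIn k c) then "Eletrônicos"
  else if ["furniture", "home", "bed", "bath", "kitchen"].any (fun k => PySem.Str.isIn k c) then "Casa e Decoração"
  else if ["fashion", "shoes", "watches", "sport"].any (fun k => PySem.Str.isIn k c) then "Moda e Esporte"
  else if ["health", "beauty", "perfumery", "baby"].any (fun k => PySem.Str.isIn k c) then "Saúde e Beleza"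
  else if ["food", "drinks", "market"].any (fun k => PySem.Str.isIn k c) then "Alimentos"
  else if ["auto", "construction", "tools"].any (fun k => PySem.Str.isIn k c) then "Auto e Ferramentas"
  else if ["books", "music", "dvds", "art"].any (fun k => PySem.Str.isIn k c) then "Livros e Cultura"
  else "Outros"

-- ===== PORT B =====
-- the dict literal KW (distinct keys, insertion order)
def pvKW : PySem.Dict String Nat := PySem.Dict.mk
  [("electronics", 0), ("computer", 0), ("tablet", 0), ("telephony", 0),
   ("furniture", 1), ("home", 1), ("bed", 1), ("bath", 1), ("kitchen", 1),
   ("fashion", 2), ("shoes", 2), ("watches", 2), ("sport", 2),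
   ("health", 3), ("beauty", 3), ("perfumery", 3), ("baby", 3),
   ("food", 4), ("drinks", 4), ("market", 4),
   ("auto", 5), ("construction", 5), ("tools", 5),
   ("books", 6), ("music", 6), ("dvds", 6), ("art", 6)]

def pvLabels : List String :=
  ["Eletrônicos", "Casa e Decoração", "Moda e Esporte", "Saúde e Beleza",
   "Alimentos", "Auto e Ferramentas", "Livros e Cultura", "Outros"]

def categorize_group_alt (cat : String) : String :=
  let c := PySem.Str.lower cat
  let n : Int := PySem.Str.len c
  let best : Nat :=
    (PySem.List.pyRange 0 n 1).foldl (fun best i =>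
      (PySem.List.pyRange (i + 3) (min (i + 12) n + 1) 1).foldl (fun best j =>
        match pvKW.get? (PySem.Str.slice c (some i) (some j)) with
        | some p => if p < best then p else best
        | none => best) best) 7
  -- LABELS[best]: best ≤ 7 always, so the pyGet? is always `some`; the getD default is unreachable
  (PySem.List.pyGet? pvLabels ((best : Int))).getD "Outros"

-- ===== PRECONDITION & SPEC =====
def Spec_categorize_group (cat : String) (out : String) : Prop := out = categorize_group_alt cat
instance (cat : String) (out : String) : Decidable (Spec_categorize_group cat out) := by unfold Spec_categorize_group; infer_instance

-- ===== CLAIM (what is proved, stated in full; the proofs are below) =====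
def Claim_equal_categorize_group : Prop := ∀ (cat : String), Dom_categorize_group cat → Spec_categorize_group cat (categorize_group cat)

-- ===== LEMMAS AND PROOFS =====

-- the keyword lists of group g, in A's order
def pvKeys : Nat → List String
  | 0 => ["electronics", "computer", "tablet", "telephony"]
  | 1 => ["furniture", "home", "bed", "bath", "kitchen"]
  | 2 => ["fashion", "shoes", "watches", "sport"]
  | 3 => ["health", "beauty", "perfumery", "baby"]
  | 4 => ["food", "drinks", "market"]
  | 5 => ["auto", "construction", "tools"]
  | 6 => ["books", "music", "dvds", "art"]
  | _ => []

-- the inner and outer loop bodies of B, and the final accumulator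
def pvStep (c : String) (i : Int) (best : Nat) (j : Int) : Nat :=
  match pvKW.get? (PySem.Str.slice c (some i) (some j)) with
  | some p => if p < best then p else best
  | none => best

def pvOuter (c : String) (n : Int) (best : Nat) (i : Int) : Nat :=
  (PySem.List.pyRange (i + 3) (min (i + 12) n + 1) 1).foldl (pvStep c i) best

def pvBest (c : String) : Nat :=
  (PySem.List.pyRange 0 (PySem.Str.len c) 1).foldl (pvOuter c (PySem.Str.len c)) 7

lemma pvAlt_eq (cat : String) :
    categorize_group_alt cat
      = (PySem.List.pyGet? pvLabels ((pvBest (PySem.Str.lower cat) : Int))).getD "Outros" := rfl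

-- generic facts about a min-tracking foldl
lemma pvFoldl_le_init {α : Type} (s : Nat → α → Nat) (hs : ∀ b x, s b x ≤ b)
    (xs : List α) (b0 : Nat) : xs.foldl s b0 ≤ b0 := by
  induction xs generalizing b0 with
  | nil => simp
  | cons y ys ih => exact le_trans (ih (s b0 y)) (hs b0 y)

lemma pvFoldl_reaches {α : Type} (s : Nat → α → Nat) (Q : α → Nat → Prop)
    (hs : ∀ b x, s b x = b ∨ Q x (s b x)) (xs : List α) (b0 : Nat) :
    xs.foldl s b0 = b0 ∨ ∃ x ∈ xs, Q x (xs.foldl s b0) := by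
  induction xs generalizing b0 with
  | nil => left; rfl
  | cons y ys ih =>
    rw [List.foldl_cons]
    rcases ih (s b0 y) with h | ⟨x, hx, hq⟩
    · rcases hs b0 y with h' | h'
      · left; rw [h, h']
      · right; exact ⟨y, List.mem_cons_self .., by rw [h]; exact h'⟩
    · right; exact ⟨x, List.mem_cons_of_mem _ hx, hq⟩

lemma pvFoldl_le_of_mem {α : Type} (s : Nat → α → Nat) (hs : ∀ b x, s b x ≤ b)
    (xs : List α) (b0 : Nat) (x : α) (p : Nat) (hx : x ∈ xs) (hp : ∀ b, s b x ≤ p) :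
    xs.foldl s b0 ≤ p := by
  induction xs generalizing b0 with
  | nil => cases hx
  | cons y ys ih =>
    rw [List.foldl_cons]
    rcases List.mem_cons.mp hx with rfl | hmem
    · exact le_trans (pvFoldl_le_init s hs ys (s b0 x)) (hp b0)
    · exact ih (s b0 y) hmem


-- step properties
lemma pvStep_le (c : String) (i : Int) : ∀ b j, pvStep c i b j ≤ b := by
  intro b j; unfold pvStep
  cases pvKW.get? (PySem.Str.slice c (some i) (some j)) with
  | none => exact le_refl b
  | some p => dsimp; split_ifs <;> omega

lemma pvStep_reach (c : String) (i : Int) :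
    ∀ b j, pvStep c i b j = b ∨
      pvKW.get? (PySem.Str.slice c (some i) (some j)) = some (pvStep c i b j) := by
  intro b j; unfold pvStep
  cases hg : pvKW.get? (PySem.Str.slice c (some i) (some j)) with
  | none => left; rfl
  | some p =>
    dsimp
    split_ifs with hlt
    · right; rfl
    · left; rfl

lemma pvStep_le_of_get (c : String) (i j : Int) (p : Nat)
    (hg : pvKW.get? (PySem.Str.slice c (some i) (some j)) = some p) :
    ∀ b, pvStep c i b j ≤ p := by
  intro b; unfold pvStep; rw [hg]; dsimp; split_ifs <;> omega

lemma pvBest_le (c : String) : pvBest c ≤ 7 :=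
  pvFoldl_le_init _ (fun b i => pvFoldl_le_init _ (pvStep_le c i) _ b) _ 7

lemma pvBest_reach (c : String) :
    pvBest c = 7 ∨ ∃ i ∈ PySem.List.pyRange 0 (PySem.Str.len c) 1,
      ∃ j ∈ PySem.List.pyRange (i + 3) (min (i + 12) (PySem.Str.len c) + 1) 1,
        pvKW.get? (PySem.Str.slice c (some i) (some j)) = some (pvBest c) := by
  unfold pvBest
  exact pvFoldl_reaches (pvOuter c (PySem.Str.len c))
    (fun i r => ∃ j ∈ PySem.List.pyRange (i + 3) (min (i + 12) (PySem.Str.len c) + 1) 1,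
        pvKW.get? (PySem.Str.slice c (some i) (some j)) = some r)
    (fun b i => by
      unfold pvOuter
      exact pvFoldl_reaches (pvStep c i)
        (fun j r => pvKW.get? (PySem.Str.slice c (some i) (some j)) = some r)
        (pvStep_reach c i) _ b)
    _ 7

lemma pvBest_le_of (c : String) (i j : Int) (p : Nat)
    (hi : i ∈ PySem.List.pyRange 0 (PySem.Str.len c) 1)
    (hj : j ∈ PySem.List.pyRange (i + 3) (min (i + 12) (PySem.Str.len c) + 1) 1)
    (hg : pvKW.get? (PySem.Str.slice c (some i) (some j)) = some p) :
    pvBest c ≤ p := by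
  unfold pvBest
  exact pvFoldl_le_of_mem (pvOuter c (PySem.Str.len c))
    (fun b i' => pvFoldl_le_init _ (pvStep_le c i') _ b) _ 7 i p hi
    (fun b => by
      unfold pvOuter
      exact pvFoldl_le_of_mem (pvStep c i) (pvStep_le c i) _ b j p hj
        (pvStep_le_of_get c i j p hg))

-- any slice of c with 0 ≤ i ≤ j is a substring of c
lemma pvSlice_isIn (c : String) (i j : Int) (hi : 0 ≤ i) (hij : i ≤ j) :
    PySem.Str.isIn (PySem.Str.slice c (some i) (some j)) c = true := by
  rw [PySem.Str.isIn_iff_infix]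
  have hl : (PySem.Str.slice c (some i) (some j)).toList
      = (c.toList.drop i.toNat).take (j.toNat - i.toNat) := by
    simp only [PySem.Str.toList_slice, PySem.Chars.slice_eq_listSlice]
    exact PySem.List.slice_toNat c.toList hi (le_trans hi hij)
  rw [hl]
  exact ((List.take_prefix _ _).isInfix).trans ((List.drop_suffix _ _).isInfix)

-- keyword facts, by computation on the literal table
set_option maxHeartbeats 1600000 in
lemma pvKey_facts : ∀ g ∈ [0, 1, 2, 3, 4, 5, 6], ∀ k ∈ pvKeys g,
    3 ≤ k.toList.length ∧ k.toList.length ≤ 12 ∧ pvKW.get? k = some g := by decide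

-- generic: a successful literal-dict lookup is a pair of the literal list
lemma pvMk_get?_mem {ν : Type} (l : List (String × ν)) (s : String) (v : ν)
    (h : (PySem.Dict.mk l).get? s = some v) : (s, v) ∈ l := by
  induction l with
  | nil => simp [PySem.Dict.get?] at h
  | cons kv rest ih =>
    obtain ⟨k, w⟩ := kv
    rw [PySem.Dict.get?_mk_cons] at h
    by_cases hk : (k == s) = true
    · rw [if_pos hk] at h
      injection h with h
      subst h
      have hks : k = s := eq_of_beq hk
      subst hks
      exact List.mem_cons_self ..
    · rw [if_neg hk] at h
      exact List.mem_cons_of_mem _ (ih h)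

set_option maxHeartbeats 1600000 in
set_option maxRecDepth 4096 in
lemma pvKW_inv (s : String) (p : Nat) (h : pvKW.get? s = some p) : s ∈ pvKeys p := by
  have hmem := pvMk_get?_mem _ _ _ h
  fin_cases hmem <;> decide

-- a matched keyword of group g < 7 bounds pvBest by g
lemma pvBg_bound (c : String) (g : Nat) (hg7 : g < 7)
    (hB : (pvKeys g).any (fun k => PySem.Str.isIn k c) = true) : pvBest c ≤ g := by
  obtain ⟨k, hk, hin⟩ := List.any_eq_true.mp hB
  have hgmem : g ∈ [0, 1, 2, 3, 4, 5, 6] := by interval_cases g <;> simp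
  obtain ⟨h3, h12, hget⟩ := pvKey_facts g hgmem k hk
  -- k occurs in c: get a position d with k a prefix of c.toList.drop d
  have hinf : PySem.Chars.isIn k.toList c.toList = true := by
    simpa using hin
  obtain ⟨d, hpre⟩ := (PySem.Chars.exists_prefix_drop_iff_isIn k.toList c.toList).mpr hinf
  have hdl : k.toList.length ≤ c.toList.length - d := by
    simpa using hpre.length_le
  have hdn : d + k.toList.length ≤ c.toList.length := by omega
  -- the slice at d of k's length is exactly k
  have hslice : PySem.Str.slice c (some (d : Int)) (some ((d : Int) + (k.toList.length : Int))) = k := by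
    apply String.toList_inj.mp
    simp only [PySem.Str.toList_slice, PySem.Chars.slice_eq_listSlice]
    rw [PySem.List.slice_natCast_add]
    exact (List.prefix_iff_eq_take.mp hpre).symm
  have hlen : PySem.Str.len c = (c.toList.length : Int) := by simp
  apply pvBest_le_of c (d : Int) ((d : Int) + (k.toList.length : Int)) g
  · rw [PySem.List.mem_pyRange_one, hlen]; omega
  · rw [PySem.List.mem_pyRange_one, hlen]
    constructor
    · omega
    · have : ((d : Int) + (k.toList.length : Int)) ≤ min ((d : Int) + 12) (c.toList.length : Int) := by
        rw [le_min_iff]; omega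
      omega
  · rw [hslice]; exact hget

-- pvBest < 7 means its own group has a matched keyword
lemma pvBest_mem (c : String) (h : pvBest c < 7) :
    (pvKeys (pvBest c)).any (fun k => PySem.Str.isIn k c) = true := by
  rcases pvBest_reach c with h7 | ⟨i, hi, j, hj, hg⟩
  · omega
  · apply List.any_eq_true.mpr
    refine ⟨PySem.Str.slice c (some i) (some j), pvKW_inv _ _ hg, ?_⟩
    rw [PySem.List.mem_pyRange_one] at hi hj
    exact pvSlice_isIn c i j hi.1 (by omega)

-- the main characterisation: A's chain equals B's table lookup
lemma pvMain (c : String) :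
    (if (pvKeys 0).any (fun k => PySem.Str.isIn k c) then "Eletrônicos"
     else if (pvKeys 1).any (fun k => PySem.Str.isIn k c) then "Casa e Decoração"
     else if (pvKeys 2).any (fun k => PySem.Str.isIn k c) then "Moda e Esporte"
     else if (pvKeys 3).any (fun k => PySem.Str.isIn k c) then "Saúde e Beleza"
     else if (pvKeys 4).any (fun k => PySem.Str.isIn k c) then "Alimentos"
     else if (pvKeys 5).any (fun k => PySem.Str.isIn k c) then "Auto e Ferramentas"
     else if (pvKeys 6).any (fun k => PySem.Str.isIn k c) then "Livros e Cultura"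
     else "Outros")
      = (PySem.List.pyGet? pvLabels ((pvBest c : Int))).getD "Outros" := by
  have hle := pvBest_le c
  by_cases h0 : (pvKeys 0).any (fun k => PySem.Str.isIn k c) = true
  · have hb : pvBest c = 0 := by have := pvBg_bound c 0 (by omega) h0; omega
    rw [if_pos h0, hb]
    rfl
  by_cases h1 : (pvKeys 1).any (fun k => PySem.Str.isIn k c) = true
  · have hb : pvBest c = 1 := by
      have hub := pvBg_bound c 1 (by omega) h1
      have : pvBest c ≠ 0 := fun he => by
        have := pvBest_mem c (by omega); rw [he] at this; exact h0 this
      omega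
    rw [if_neg h0, if_pos h1, hb]
    rfl
  by_cases h2 : (pvKeys 2).any (fun k => PySem.Str.isIn k c) = true
  · have hb : pvBest c = 2 := by
      have hub := pvBg_bound c 2 (by omega) h2
      have hne : ∀ g, pvBest c = g → g < 2 → False := fun g he hg => by
        have := pvBest_mem c (by omega)
        rw [he] at this
        interval_cases g
        · exact h0 this
        · exact h1 this
      have n0 : pvBest c ≠ 0 := fun he => hne 0 he (by omega)
      have n1 : pvBest c ≠ 1 := fun he => hne 1 he (by omega)
      omega
    rw [if_neg h0, if_neg h1, if_pos h2, hb]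
    rfl
  by_cases h3 : (pvKeys 3).any (fun k => PySem.Str.isIn k c) = true
  · have hb : pvBest c = 3 := by
      have hub := pvBg_bound c 3 (by omega) h3
      have hne : ∀ g, pvBest c = g → g < 3 → False := fun g he hg => by
        have := pvBest_mem c (by omega)
        rw [he] at this
        interval_cases g
        · exact h0 this
        · exact h1 this
        · exact h2 this
      have n0 : pvBest c ≠ 0 := fun he => hne 0 he (by omega)
      have n1 : pvBest c ≠ 1 := fun he => hne 1 he (by omega)
      have n2 : pvBest c ≠ 2 := fun he => hne 2 he (by omega)
      omega
    rw [if_neg h0, if_neg h1, if_neg h2, if_pos h3, hb]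
    rfl
  by_cases h4 : (pvKeys 4).any (fun k => PySem.Str.isIn k c) = true
  · have hb : pvBest c = 4 := by
      have hub := pvBg_bound c 4 (by omega) h4
      have hne : ∀ g, pvBest c = g → g < 4 → False := fun g he hg => by
        have := pvBest_mem c (by omega)
        rw [he] at this
        interval_cases g
        · exact h0 this
        · exact h1 this
        · exact h2 this
        · exact h3 this
      have n0 : pvBest c ≠ 0 := fun he => hne 0 he (by omega)
      have n1 : pvBest c ≠ 1 := fun he => hne 1 he (by omega)
      have n2 : pvBest c ≠ 2 := fun he => hne 2 he (by omega)
      have n3 : pvBest c ≠ 3 := fun he => hne 3 he (by omega)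
      omega
    rw [if_neg h0, if_neg h1, if_neg h2, if_neg h3, if_pos h4, hb]
    rfl
  by_cases h5 : (pvKeys 5).any (fun k => PySem.Str.isIn k c) = true
  · have hb : pvBest c = 5 := by
      have hub := pvBg_bound c 5 (by omega) h5
      have hne : ∀ g, pvBest c = g → g < 5 → False := fun g he hg => by
        have := pvBest_mem c (by omega)
        rw [he] at this
        interval_cases g
        · exact h0 this
        · exact h1 this
        · exact h2 this
        · exact h3 this
        · exact h4 this
      have n0 : pvBest c ≠ 0 := fun he => hne 0 he (by omega)
      have n1 : pvBest c ≠ 1 := fun he => hne 1 he (by omega)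
      have n2 : pvBest c ≠ 2 := fun he => hne 2 he (by omega)
      have n3 : pvBest c ≠ 3 := fun he => hne 3 he (by omega)
      have n4 : pvBest c ≠ 4 := fun he => hne 4 he (by omega)
      omega
    rw [if_neg h0, if_neg h1, if_neg h2, if_neg h3, if_neg h4, if_pos h5, hb]
    rfl
  by_cases h6 : (pvKeys 6).any (fun k => PySem.Str.isIn k c) = true
  · have hb : pvBest c = 6 := by
      have hub := pvBg_bound c 6 (by omega) h6
      have hne : ∀ g, pvBest c = g → g < 6 → False := fun g he hg => by
        have := pvBest_mem c (by omega)
        rw [he] at this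
        interval_cases g
        · exact h0 this
        · exact h1 this
        · exact h2 this
        · exact h3 this
        · exact h4 this
        · exact h5 this
      have n0 : pvBest c ≠ 0 := fun he => hne 0 he (by omega)
      have n1 : pvBest c ≠ 1 := fun he => hne 1 he (by omega)
      have n2 : pvBest c ≠ 2 := fun he => hne 2 he (by omega)
      have n3 : pvBest c ≠ 3 := fun he => hne 3 he (by omega)
      have n4 : pvBest c ≠ 4 := fun he => hne 4 he (by omega)
      have n5 : pvBest c ≠ 5 := fun he => hne 5 he (by omega)
      omega
    rw [if_neg h0, if_neg h1, if_neg h2, if_neg h3, if_neg h4, if_neg h5, if_pos h6, hb]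
    rfl
  · have hb : pvBest c = 7 := by
      have hne : ∀ g, pvBest c = g → g < 7 → False := fun g he hg => by
        have := pvBest_mem c (by omega)
        rw [he] at this
        interval_cases g
        · exact h0 this
        · exact h1 this
        · exact h2 this
        · exact h3 this
        · exact h4 this
        · exact h5 this
        · exact h6 this
      have n0 : pvBest c ≠ 0 := fun he => hne 0 he (by omega)
      have n1 : pvBest c ≠ 1 := fun he => hne 1 he (by omega)
      have n2 : pvBest c ≠ 2 := fun he => hne 2 he (by omega)
      have n3 : pvBest c ≠ 3 := fun he => hne 3 he (by omega)
      have n4 : pvBest c ≠ 4 := fun he => hne 4 he (by omega)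
      have n5 : pvBest c ≠ 5 := fun he => hne 5 he (by omega)
      have n6 : pvBest c ≠ 6 := fun he => hne 6 he (by omega)
      omega
    rw [if_neg h0, if_neg h1, if_neg h2, if_neg h3, if_neg h4, if_neg h5, if_neg h6, hb]
    rfl

-- ===== VERDICT (by name: the statement is the Claim_ definition above) =====
theorem categorize_group_spec : Claim_equal_categorize_group := by
  intro cat _
  show categorize_group cat = categorize_group_alt cat
  rw [pvAlt_eq]
  exact pvMain (PySem.Str.lower cat)
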